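-- pv_equiv track=rewrite | github.com/pyiron/flowrep | tests/integration/test_parsing_for_loops.py | nested_with_passed_input
-- ===== SOURCE A (Python) =====
-- def sum_elements(lst: list[int]) -> int:
--     total = sum(lst)
--     return total
--
-- def my_offset_range(n: int, offset: int) -> list[int]:
--     return list(range(n + offset))
--
-- def my_offset_square(n: int, offset: int) -> int:
--     n_sq = (n + offset) ** 2
--     return n_sq
--
-- def nested_with_passed_input(ns, range_offset, square_offset):
--     """
--     While the accumulators must come from the local scope, note that
--     we can safely leverage non-accumulator symbols from arbitrary scope,
--     since these can be consistently passed through control flow structures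
--     """
--
--     sq_sums = []
--     for n in ns:
--
--         rs = my_offset_range(n, range_offset)
--         squares = []
--         for r in rs:
--             sq = my_offset_square(r, square_offset)
--             # Uses square_offset from the outer context
--             squares.append(sq)
--         summed = sum_elements(squares)
--         sq_sums.append(summed)
--
--     return sq_sums
-- ===== SOURCE B (Python) =====
-- def nested_with_passed_input(ns, range_offset, square_offset):
--     sq_sums = []
--     s = square_offset
--     for n in ns:
--         m = n + range_offset
--         if m <= 0:
--             sq_sums.append(0)
--         else:
--             sq_sums.append(m * (m - 1) * (2 * m - 1) // 6 + s * m * (m - 1) + m * s * s)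
--     return sq_sums
-- ===== Notes on version B (the rewrite author's own statement) =====
-- stated objective: faster
-- what changed: Replaces the inner loop over range(n+range_offset) by the closed-form sum-of-squares formula m(m-1)(2m-1)/6 + s*m*(m-1) + m*s^2 per element (0 for empty ranges), making each element O(1).
import Mathlib
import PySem

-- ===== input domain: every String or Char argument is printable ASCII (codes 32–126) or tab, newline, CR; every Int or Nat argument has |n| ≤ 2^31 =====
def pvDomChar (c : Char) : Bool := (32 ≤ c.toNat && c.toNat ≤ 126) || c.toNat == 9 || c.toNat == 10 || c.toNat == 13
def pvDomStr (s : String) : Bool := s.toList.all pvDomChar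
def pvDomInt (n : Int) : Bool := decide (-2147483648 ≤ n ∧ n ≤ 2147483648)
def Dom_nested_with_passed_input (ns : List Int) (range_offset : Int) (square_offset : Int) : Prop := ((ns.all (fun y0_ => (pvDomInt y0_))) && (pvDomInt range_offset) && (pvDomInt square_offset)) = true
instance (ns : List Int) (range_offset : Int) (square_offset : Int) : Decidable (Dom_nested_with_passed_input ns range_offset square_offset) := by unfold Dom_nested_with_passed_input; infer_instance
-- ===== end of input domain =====

-- B replaces A's inner loop by the closed-form sum-of-squares formula per element (objective: faster, asymptotically).

-- ===== PORT A =====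
-- sum(lst) as a tail-recursive fold
def sum_elements_go (lst : List Int) (total : Int) : Int :=
  match lst with
  | [] => total
  | x :: xs => sum_elements_go xs (total + x)

def sum_elements (lst : List Int) : Int := sum_elements_go lst 0

def my_offset_range (n : Int) (offset : Int) : List Int := PySem.List.pyRange 0 (n + offset) 1

def my_offset_square (n : Int) (offset : Int) : Int := (n + offset) ^ 2

-- 'for r in rs: squares.append(my_offset_square(r, square_offset))': append loop,
-- accumulated in reverse and reversed at the end (same list, tail-recursive)
def nested_with_passed_input_inner (rs : List Int) (square_offset : Int) (squares : List Int) : List Int :=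
  match rs with
  | [] => squares.reverse
  | r :: rs => nested_with_passed_input_inner rs square_offset (my_offset_square r square_offset :: squares)

-- 'for n in ns: sq_sums.append(...)' likewise
def nested_with_passed_input_outer (ns : List Int) (range_offset : Int) (square_offset : Int) (sq_sums : List Int) : List Int :=
  match ns with
  | [] => sq_sums.reverse
  | n :: ns =>
      let rs := my_offset_range n range_offset
      let squares := nested_with_passed_input_inner rs square_offset []
      let summed := sum_elements squares
      nested_with_passed_input_outer ns range_offset square_offset (summed :: sq_sums)

def nested_with_passed_input (ns : List Int) (range_offset : Int) (square_offset : Int) : List Int :=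
  nested_with_passed_input_outer ns range_offset square_offset []

-- ===== PORT B =====
def nested_with_passed_input_alt (ns : List Int) (range_offset : Int) (square_offset : Int) : List Int :=
  match ns with
  | [] => []
  | n :: ns =>
      (let m := n + range_offset
       let s := square_offset
       if m ≤ 0 then 0 else
         PySem.Int.floordiv (m * (m - 1) * (2 * m - 1)) 6 + s * m * (m - 1) + m * s * s)
        :: nested_with_passed_input_alt ns range_offset square_offset

-- ===== PRECONDITION & SPEC =====
def Spec_nested_with_passed_input (ns : List Int) (range_offset : Int) (square_offset : Int) (out : List Int) : Prop := out = nested_with_passed_input_alt ns range_offset square_offset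
instance (ns : List Int) (range_offset : Int) (square_offset : Int) (out : List Int) : Decidable (Spec_nested_with_passed_input ns range_offset square_offset out) := by unfold Spec_nested_with_passed_input; infer_instance

-- ===== CLAIM (what is proved, stated in full; the proofs are below) =====
def Claim_equal_nested_with_passed_input : Prop := ∀ (ns : List Int) (range_offset : Int) (square_offset : Int), Dom_nested_with_passed_input ns range_offset square_offset → Spec_nested_with_passed_input ns range_offset square_offset (nested_with_passed_input ns range_offset square_offset)

-- ===== LEMMAS AND PROOFS =====

-- closed form for the sum of shifted squares, stated multiplied by 6
lemma six_mul_sum_sq (k : Nat) (s : Int) :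
    6 * (((List.range k).map (fun j : Nat => ((j : Int) + s) ^ 2)).sum - s * k * (k - 1) - k * s * s)
      = (k : Int) * (k - 1) * (2 * k - 1) := by
  induction k with
  | zero => simp
  | succ k ih =>
      rw [List.range_succ, List.map_append, List.sum_append]
      simp only [List.map_cons, List.map_nil, List.sum_cons, List.sum_nil, Nat.cast_add,
        Nat.cast_one]
      linear_combination ih

lemma elem_eq (m s : Int) :
    ((PySem.List.pyRange 0 m 1).map (fun r => (r + s) ^ 2)).sum
      = (if m ≤ 0 then 0 else
          PySem.Int.floordiv (m * (m - 1) * (2 * m - 1)) 6 + s * m * (m - 1) + m * s * s) := by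
  by_cases h : m ≤ 0
  · rw [PySem.List.pyRange_one_eq_nil h]
    simp [h]
  · simp only [if_neg h]
    have heq : ((PySem.List.pyRange 0 m 1).map (fun r => (r + s) ^ 2)).sum
        = ((List.range m.toNat).map (fun j : Nat => ((j : Int) + s) ^ 2)).sum := by
      rw [PySem.List.pyRange_one, List.map_map]
      simp [Function.comp_def]
    have hm : ((m.toNat : Int)) = m := Int.toNat_of_nonneg (by omega)
    have hs := six_mul_sum_sq m.toNat s
    rw [hm, ← heq] at hs
    have hfd : PySem.Int.floordiv (m * (m - 1) * (2 * m - 1)) 6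
        = (((PySem.List.pyRange 0 m 1).map (fun r => (r + s) ^ 2)).sum - s * m * (m - 1) - m * s * s) := by
      rw [PySem.Int.floordiv_eq_ediv_of_pos (by norm_num), ← hs,
        Int.mul_ediv_cancel_left _ (by norm_num)]
    rw [hfd]; ring

lemma sum_elements_go_eq (lst : List Int) (t : Int) : sum_elements_go lst t = t + lst.sum := by
  induction lst generalizing t with
  | nil => simp [sum_elements_go]
  | cons x xs ih => simp [sum_elements_go, ih]; ring

lemma inner_eq_map (rs : List Int) (s : Int) (acc : List Int) :
    nested_with_passed_input_inner rs s acc = acc.reverse ++ rs.map (fun r => (r + s) ^ 2) := by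
  induction rs generalizing acc with
  | nil => simp [nested_with_passed_input_inner]
  | cons r rs ih => simp [nested_with_passed_input_inner, my_offset_square, ih]

lemma outer_eq (ns : List Int) (ro so : Int) (acc : List Int) :
    nested_with_passed_input_outer ns ro so acc
      = acc.reverse ++ nested_with_passed_input_alt ns ro so := by
  induction ns generalizing acc with
  | nil => simp [nested_with_passed_input_outer, nested_with_passed_input_alt]
  | cons n ns ih =>
      simp only [nested_with_passed_input_outer, nested_with_passed_input_alt, ih,
        List.reverse_cons, List.append_assoc, List.singleton_append]
      congr 2
      rw [my_offset_range, inner_eq_map, List.reverse_nil, List.nil_append, sum_elements,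
        sum_elements_go_eq, Int.zero_add]
      exact elem_eq (n + ro) so

-- ===== VERDICT (by name: the statement is the Claim_ definition above) =====
theorem nested_with_passed_input_spec : Claim_equal_nested_with_passed_input := by
  intro ns ro so _
  unfold Spec_nested_with_passed_input nested_with_passed_input
  rw [outer_eq, List.reverse_nil, List.nil_append]
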